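-- pv_equiv track=rewrite | github.com/wherby/code | algorithm/segmentTree/quickVersion/SparseTable.py | minStable
-- ===== SOURCE A (Python) =====
-- from typing import List, Tuple, Optional
-- from math import gcd
--
-- class SparseTable:
--     __slots__ = 'op', 'st'
--     def __init__(self, nums, op):
--         # op 需要满足可重复贡献，即 x op x = x，如 max, min, gcd, lcm, and, or
--         # 建立 O(nlogn)，查询 O(1)
--         n = len(nums)
--         m = n.bit_length()
--         st = [[0] * (n - (1<<b) + 1) for b in range(m)]
--         for i, x in enumerate(nums):
--             st[0][i] = x
--         for b in range(1, m):
--             l = 1 << (b-1)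
--             for i in range(n - (1<<b) + 1):
--                 st[b][i] = op(st[b-1][i], st[b-1][i+l])
--         self.op = op
--         self.st = st
--
--     def query(self, left, right):
--         b = (right - left + 1).bit_length() - 1
--         return self.op(self.st[b][left], self.st[b][right - (1<<b) + 1])
--
-- def minStable(nums: List[int], chg: int) -> int:
--     st = SparseTable(nums, gcd)
--     n = len(nums)
--     def check(lim):
--         rem = chg
--         i = 0
--         while i + lim <= n:
--             g = st.query(i, i+lim-1)
--             if g >= 2:
--                 if rem == 0:
--                     return False
--                 rem -= 1
--                 i = i + lim
--             else:
--                 i += 1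
--         return True
--
--     lo, hi = 1, n + 1
--     while lo < hi:
--         mid = (lo + hi) // 2
--         if check(mid):
--             hi = mid
--         else:
--             lo = mid + 1
--     return lo - 1
-- ===== SOURCE B (Python) =====
-- from typing import List
-- from math import gcd
--
-- def minStable(nums: List[int], chg: int) -> int:
--     # Simpler: no precomputed table; each window gcd is folded directly over the
--     # window (stopping once it hits 1), and the binary search is a recursive bisection.
--     n = len(nums)
--
--     def window_gcd(i: int, lim: int) -> int:
--         g = 0
--         for j in range(i, i + lim):
--             g = gcd(g, nums[j])
--             if g == 1:
--                 return 1
--         return g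
--
--     def ok(lim: int) -> bool:
--         rem = chg
--         i = 0
--         while i + lim <= n:
--             if window_gcd(i, lim) >= 2:
--                 if rem == 0:
--                     return False
--                 rem -= 1
--                 i += lim
--             else:
--                 i += 1
--         return True
--
--     def search(lo: int, hi: int) -> int:
--         if lo >= hi:
--             return lo
--         mid = (lo + hi) // 2
--         if ok(mid):
--             return search(lo, mid)
--         return search(mid + 1, hi)
--
--     return search(1, n + 1) - 1
-- ===== Notes on version B (the rewrite author's own statement) =====
-- stated objective: simpler
-- what changed: Drops the SparseTable entirely (no O(n log n) table build, no two-overlap O(1) lookups): each window gcd is folded directly over the window with an early exit once the gcd hits 1, and the iterative binary search becomes a recursive bisection.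
import Mathlib
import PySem

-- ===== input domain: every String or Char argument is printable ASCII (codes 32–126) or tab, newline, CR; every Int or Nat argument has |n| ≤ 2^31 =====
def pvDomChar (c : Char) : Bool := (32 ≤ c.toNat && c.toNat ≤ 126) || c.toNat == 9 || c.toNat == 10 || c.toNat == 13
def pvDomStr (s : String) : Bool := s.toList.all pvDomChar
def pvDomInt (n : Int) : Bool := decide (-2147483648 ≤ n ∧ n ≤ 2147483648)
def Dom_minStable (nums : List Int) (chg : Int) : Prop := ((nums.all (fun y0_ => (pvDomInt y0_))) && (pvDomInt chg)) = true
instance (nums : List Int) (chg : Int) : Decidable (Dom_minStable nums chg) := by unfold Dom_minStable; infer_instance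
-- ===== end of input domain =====

-- B replaces A's SparseTable by folding gcd directly over each window slice and writes the
-- binary search as a recursive bisection; same return value, simpler structure (no speed claim).

-- ===== PORT A =====
-- math.gcd, exact for Python ints (nonnegative gcd of absolute values); also used by the B port
def pyGcd (a b : Int) : Int := (Int.gcd a b : Int)

def stBuild (op : Int → Int → Int) (nums : List Int) : List (List Int) :=
  let n := nums.length
  (List.range (Nat.size n)).foldl
    (fun st b =>
      if b = 0 then st ++ [nums]
      else
        let prev := st.getD (b - 1) []
        st ++ [(List.range (n + 1 - (1 <<< b))).map
          (fun i => op (prev.getD i 0) (prev.getD (i + (1 <<< (b - 1))) 0))])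
    []

def stQuery (op : Int → Int → Int) (st : List (List Int)) (l r : Nat) : Int :=
  let b := Nat.size (r - l + 1) - 1
  op ((st.getD b []).getD l 0) ((st.getD b []).getD (r + 1 - (1 <<< b)) 0)

-- the 'while i + lim <= n' loop of check, on fuel ≥ the number of iterations left
def checkLoop (st : List (List Int)) (n lim : Nat) : Nat → Int → Nat → Bool
  | 0, _, _ => true
  | fuel + 1, rem, i =>
    if i + lim ≤ n then
      let g := stQuery pyGcd st i (i + lim - 1)
      if g ≥ 2 then
        if rem = 0 then false
        else checkLoop st n lim fuel (rem - 1) (i + lim)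
      else checkLoop st n lim fuel rem (i + 1)
    else true

-- the 'while lo < hi' binary-search loop, on fuel ≥ the number of iterations left
def bsLoop (st : List (List Int)) (n : Nat) (chg : Int) : Nat → Nat → Nat → Nat
  | 0, lo, _ => lo
  | fuel + 1, lo, hi =>
    if lo < hi then
      let mid := (lo + hi) / 2
      if checkLoop st n mid (n + 2) chg 0 then bsLoop st n chg fuel lo mid
      else bsLoop st n chg fuel (mid + 1) hi
    else lo

def minStable (nums : List Int) (chg : Int) : Int :=
  let st := stBuild pyGcd nums
  let n := nums.length
  (bsLoop st n chg (n + 2) 1 (n + 1) : Int) - 1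

-- ===== PORT B =====
-- gcd folded directly over the window nums[i], …, nums[i+lim-1], stopping once it hits 1
def winGcdLoop (nums : List Int) : Nat → Nat → Int → Int
  | 0, _, g => g
  | k + 1, j, g =>
    let g' := pyGcd g (nums.getD j 0)
    if g' = 1 then 1 else winGcdLoop nums k (j + 1) g'

def windowGcd (nums : List Int) (i lim : Nat) : Int :=
  winGcdLoop nums lim i 0

def okLoop (nums : List Int) (n lim : Nat) : Nat → Int → Nat → Bool
  | 0, _, _ => true
  | fuel + 1, rem, i =>
    if i + lim ≤ n then
      if windowGcd nums i lim ≥ 2 then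
        if rem = 0 then false
        else okLoop nums n lim fuel (rem - 1) (i + lim)
      else okLoop nums n lim fuel rem (i + 1)
    else true

def searchRec (nums : List Int) (n : Nat) (chg : Int) : Nat → Nat → Nat → Nat
  | 0, lo, _ => lo
  | fuel + 1, lo, hi =>
    if lo < hi then
      let mid := (lo + hi) / 2
      if okLoop nums n mid (n + 2) chg 0 then searchRec nums n chg fuel lo mid
      else searchRec nums n chg fuel (mid + 1) hi
    else lo

def minStable_alt (nums : List Int) (chg : Int) : Int :=
  let n := nums.length
  (searchRec nums n chg (n + 2) 1 (n + 1) : Int) - 1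


-- ===== PRECONDITION & SPEC =====
def Spec_minStable (nums : List Int) (chg : Int) (out : Int) : Prop := out = minStable_alt nums chg
instance (nums : List Int) (chg : Int) (out : Int) : Decidable (Spec_minStable nums chg out) := by unfold Spec_minStable; infer_instance

-- ===== CLAIM (what is proved, stated in full; the proofs are below) =====
def Claim_equal_minStable : Prop := ∀ (nums : List Int) (chg : Int), Dom_minStable nums chg → Spec_minStable nums chg (minStable nums chg)

-- ===== LEMMAS AND PROOFS =====
-- gcd of the absolute values of a list, as a Nat
def gcdList (l : List Int) : Nat := l.foldl (fun g x => Nat.gcd g x.natAbs) 0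

-- window of nums
def win (nums : List Int) (i len : Nat) : List Int := (nums.drop i).take len

theorem foldl_pyGcd (l : List Int) (m : Nat) :
    l.foldl pyGcd (m : Int) = ((l.foldl (fun (g : Nat) (x : Int) => Nat.gcd g x.natAbs) m : Nat) : Int) := by
  induction l generalizing m with
  | nil => rfl
  | cons x l ih =>
    simp only [List.foldl_cons]
    have : pyGcd (m : Int) x = ((Nat.gcd m x.natAbs : Nat) : Int) := by
      simp [pyGcd, Int.gcd]
    rw [this, ih]

theorem foldl_gcd_start (l : List Int) (m : Nat) :
    l.foldl (fun (g : Nat) (x : Int) => Nat.gcd g x.natAbs) m = Nat.gcd m (gcdList l) := by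
  induction l generalizing m with
  | nil => simp [gcdList]
  | cons x l ih =>
    simp only [List.foldl_cons, gcdList] at *
    rw [ih (Nat.gcd m x.natAbs), ih (Nat.gcd 0 x.natAbs), Nat.gcd_zero_left, ← Nat.gcd_assoc]

theorem gcdList_cons (x : Int) (l : List Int) :
    gcdList (x :: l) = Nat.gcd x.natAbs (gcdList l) := by
  show List.foldl _ _ _ = _
  rw [List.foldl_cons, foldl_gcd_start, Nat.gcd_zero_left]

theorem gcdList_append (l1 l2 : List Int) :
    gcdList (l1 ++ l2) = Nat.gcd (gcdList l1) (gcdList l2) := by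
  show List.foldl _ _ _ = _
  rw [List.foldl_append, foldl_gcd_start]
  rfl

theorem dvd_gcdList {d : Nat} (l : List Int) :
    d ∣ gcdList l ↔ ∀ x ∈ l, d ∣ x.natAbs := by
  induction l with
  | nil => simp [gcdList]
  | cons x l ih =>
    rw [gcdList_cons, Nat.dvd_gcd_iff]
    simp [ih]

theorem gcdList_dvd_mem (l : List Int) (x : Int) (hx : x ∈ l) : gcdList l ∣ x.natAbs :=
  (dvd_gcdList l).1 dvd_rfl x hx

theorem foldl_pyGcd_one (l : List Int) : l.foldl pyGcd 1 = 1 := by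
  induction l with
  | nil => rfl
  | cons x l ih =>
    have : pyGcd 1 x = 1 := by simp [pyGcd, Int.gcd]
    simp [this, ih]

theorem winGcdLoop_eq (nums : List Int) :
    ∀ (k j : Nat) (g : Int), j + k ≤ nums.length →
      winGcdLoop nums k j g = ((nums.drop j).take k).foldl pyGcd g := by
  intro k
  induction k with
  | zero => intro j g _; rfl
  | succ k ih =>
    intro j g h
    have hj : j < nums.length := by omega
    have hsplit : (nums.drop j).take (k + 1) = nums[j] :: (nums.drop (j + 1)).take k := by
      rw [List.drop_eq_getElem_cons hj, List.take_succ_cons]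
    rw [winGcdLoop, hsplit, List.foldl_cons]
    have hget : nums.getD j 0 = nums[j] := by
      simp [List.getD, List.getElem?_eq_getElem hj]
    rw [hget]
    by_cases h1 : pyGcd g nums[j] = 1
    · rw [if_pos h1, h1, foldl_pyGcd_one]
    · rw [if_neg h1, ih (j + 1) _ (by omega)]

-- windowGcd = gcdList of the window (for windows inside the list)
theorem windowGcd_eq (nums : List Int) (i lim : Nat) (h : i + lim ≤ nums.length) :
    windowGcd nums i lim = (gcdList (win nums i lim) : Int) := by
  rw [windowGcd, winGcdLoop_eq nums lim i 0 h]
  simpa [gcdList, win] using foldl_pyGcd ((nums.drop i).take lim) 0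

-- window splitting
theorem win_add (nums : List Int) (i a b : Nat) :
    win nums i (a + b) = win nums i a ++ win nums (i + a) b := by
  simp [win, List.take_add, List.drop_drop]

theorem gcdList_win_add (nums : List Int) (i a b : Nat) :
    gcdList (win nums i (a + b)) = Nat.gcd (gcdList (win nums i a)) (gcdList (win nums (i + a) b)) := by
  rw [win_add, gcdList_append]

-- overlap lemma: two overlapping k-windows covering [i, i+len) have the same gcd as the whole
theorem gcdList_overlap (nums : List Int) (i len k : Nat)
    (hk1 : k ≤ len) (hk2 : len ≤ 2 * k) (hle : i + len ≤ nums.length) :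
    Nat.gcd (gcdList (win nums i k)) (gcdList (win nums (i + (len - k)) k)) = gcdList (win nums i len) := by
  have hlen1 : (win nums i len).length = len := by
    simp [win]; omega
  apply Nat.dvd_antisymm
  · rw [dvd_gcdList]
    intro x hx
    rw [List.mem_iff_getElem] at hx
    obtain ⟨j, hj, hxj⟩ := hx
    rw [hlen1] at hj
    by_cases hjk : j < k
    · have hmem : x ∈ win nums i k := by
        rw [List.mem_iff_getElem]
        refine ⟨j, by simp [win]; omega, ?_⟩
        rw [← hxj]
        simp [win]
    -- both sides are nums[i+j]
      exact dvd_trans (Nat.gcd_dvd_left _ _) (gcdList_dvd_mem _ x hmem)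
    · have hmem : x ∈ win nums (i + (len - k)) k := by
        rw [List.mem_iff_getElem]
        refine ⟨j - (len - k), by simp [win]; omega, ?_⟩
        rw [← hxj]
        simp only [win, List.getElem_take, List.getElem_drop]
        congr 1
        omega
      exact dvd_trans (Nat.gcd_dvd_right _ _) (gcdList_dvd_mem _ x hmem)
  · apply Nat.dvd_gcd
    · rw [dvd_gcdList]
      intro x hx
      apply gcdList_dvd_mem
      have heq : win nums i k = (win nums i len).take k := by
        simp [win, List.take_take, Nat.min_eq_left hk1]
      rw [heq] at hx
      exact List.mem_of_mem_take hx
    · rw [dvd_gcdList]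
      intro x hx
      apply gcdList_dvd_mem
      have heq : win nums (i + (len - k)) k = (win nums i len).drop (len - k) := by
        simp only [win, List.drop_take, List.drop_drop]
        rw [show len - (len - k) = k from by omega]
      rw [heq] at hx
      exact List.mem_of_mem_drop hx
-- functional characterization of the sparse-table rows
def rowsSpec (nums : List Int) : Nat → List Int
  | 0 => nums
  | b + 1 =>
      (List.range (nums.length + 1 - 2 ^ (b + 1))).map
        (fun i => pyGcd ((rowsSpec nums b).getD i 0) ((rowsSpec nums b).getD (i + 2 ^ b) 0))

theorem stBuild_eq (nums : List Int) :
    stBuild pyGcd nums = (List.range (Nat.size nums.length)).map (rowsSpec nums) := by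
  rw [stBuild]
  generalize Nat.size nums.length = m
  induction m with
  | zero => simp
  | succ m ih =>
    rw [List.range_succ, List.foldl_append, ih, List.map_append, List.foldl_cons, List.foldl_nil]
    cases m with
    | zero => simp [rowsSpec]
    | succ b =>
      simp only [if_neg (Nat.succ_ne_zero b)]
      congr 1
      have hget : (List.map (rowsSpec nums) (List.range (b + 1))).getD (b + 1 - 1) [] = rowsSpec nums b := by
        simp [List.getD, List.getElem?_map]
      rw [hget]
      simp [rowsSpec, Nat.one_shiftLeft]

-- row invariant: in-range entries of row b have |.| = gcd of the 2^b-window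
theorem rowsSpec_natAbs (nums : List Int) (b i : Nat) (h : i + 2 ^ b ≤ nums.length) :
    ((rowsSpec nums b).getD i 0).natAbs = gcdList (win nums i (2 ^ b)) := by
  induction b generalizing i with
  | zero =>
    have hi : i < nums.length := by simpa using h
    have : (rowsSpec nums 0).getD i 0 = nums[i] := by
      simp [rowsSpec, List.getD, List.getElem?_eq_getElem hi]
    rw [this]
    have hwin : win nums i (2 ^ 0) = [nums[i]] := by
      simp [win, List.take_one, List.head?_drop, List.getElem?_eq_getElem hi]
    rw [hwin, gcdList_cons]
    simp [gcdList]
  | succ b ih =>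
    have hstep : 2 ^ (b + 1) = 2 ^ b + 2 ^ b := by
      rw [Nat.pow_succ]; ring
    rw [hstep] at h
    have hlt : i < nums.length + 1 - 2 ^ (b + 1) := by rw [hstep]; omega
    have hget : (rowsSpec nums (b + 1)).getD i 0 =
        pyGcd ((rowsSpec nums b).getD i 0) ((rowsSpec nums b).getD (i + 2 ^ b) 0) := by
      simp [rowsSpec, List.getD, List.getElem?_map, List.getElem?_range hlt]
    rw [hget]
    have h1 : i + 2 ^ b ≤ nums.length := le_trans (Nat.add_le_add_left (Nat.le_add_right _ _) i) h
    have h2 : (i + 2 ^ b) + 2 ^ b ≤ nums.length := by rw [Nat.add_assoc]; exact h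
    have : (pyGcd ((rowsSpec nums b).getD i 0) ((rowsSpec nums b).getD (i + 2 ^ b) 0)).natAbs
        = Nat.gcd ((rowsSpec nums b).getD i 0).natAbs (((rowsSpec nums b).getD (i + 2 ^ b) 0)).natAbs := by
      simp [pyGcd, Int.gcd]
    rw [this, ih i h1, ih (i + 2 ^ b) h2, ← gcdList_win_add, ← hstep]

-- the sparse-table query equals the direct window gcd
theorem stQuery_eq (nums : List Int) (i lim : Nat) (hlim : 0 < lim) (h : i + lim ≤ nums.length) :
    stQuery pyGcd (stBuild pyGcd nums) i (i + lim - 1) = windowGcd nums i lim := by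
  have hspan : (i + lim - 1) - i + 1 = lim := by omega
  set b := Nat.size lim - 1 with hb
  have hsz : 0 < Nat.size lim := Nat.size_pos.mpr hlim
  have hk1 : 2 ^ b ≤ lim := by
    by_contra hc
    push_neg at hc
    have := Nat.size_le.mpr hc
    omega
  have hk2 : lim < 2 * 2 ^ b := by
    have h1 : lim < 2 ^ Nat.size lim := Nat.lt_size_self lim
    have h2 : 2 ^ Nat.size lim = 2 * 2 ^ b := by
      rw [hb, ← Nat.pow_succ']
      congr 1
      omega
    omega
  have hbm : b < Nat.size nums.length := by
    have : Nat.size lim ≤ Nat.size nums.length := Nat.size_le_size (by omega)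
    omega
  have hrow : (stBuild pyGcd nums).getD b [] = rowsSpec nums b := by
    rw [stBuild_eq]
    simp [List.getD, List.getElem?_map, List.getElem?_range hbm]
  rw [stQuery]
  simp only [hspan, Nat.one_shiftLeft]
  rw [hrow]
  have hq1 : (i + lim - 1) + 1 - 2 ^ b = i + (lim - 2 ^ b) := by omega
  rw [hq1]
  have e1 := rowsSpec_natAbs nums b i (by omega)
  have e2 := rowsSpec_natAbs nums b (i + (lim - 2 ^ b)) (by omega)
  have : pyGcd ((rowsSpec nums b).getD i 0) ((rowsSpec nums b).getD (i + (lim - 2 ^ b)) 0)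
      = (Nat.gcd ((rowsSpec nums b).getD i 0).natAbs (((rowsSpec nums b).getD (i + (lim - 2 ^ b)) 0)).natAbs : Nat) := by
    simp [pyGcd, Int.gcd]
  rw [this, e1, e2, gcdList_overlap nums i lim (2 ^ b) hk1 (by omega) h, windowGcd_eq nums i lim h]
theorem check_eq_ok (nums : List Int) (lim : Nat) (hlim : 0 < lim) :
    ∀ (fuel : Nat) (rem : Int) (i : Nat),
      checkLoop (stBuild pyGcd nums) nums.length lim fuel rem i = okLoop nums nums.length lim fuel rem i := by
  intro fuel
  induction fuel with
  | zero => intro rem i; rfl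
  | succ fuel ih =>
    intro rem i
    rw [checkLoop, okLoop]
    by_cases h : i + lim ≤ nums.length
    · rw [if_pos h, if_pos h]
      simp only [stQuery_eq nums i lim hlim h]
      by_cases hg : windowGcd nums i lim ≥ 2
      · rw [if_pos hg, if_pos hg]
        by_cases hr : rem = 0
        · rw [if_pos hr, if_pos hr]
        · rw [if_neg hr, if_neg hr, ih]
      · rw [if_neg hg, if_neg hg, ih]
    · rw [if_neg h, if_neg h]

theorem bs_eq_search (nums : List Int) (chg : Int) :
    ∀ (fuel lo hi : Nat), 0 < lo →
      bsLoop (stBuild pyGcd nums) nums.length chg fuel lo hi = searchRec nums nums.length chg fuel lo hi := by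
  intro fuel
  induction fuel with
  | zero => intro lo hi _; rfl
  | succ fuel ih =>
    intro lo hi hlo
    rw [bsLoop, searchRec]
    by_cases h : lo < hi
    · rw [if_pos h, if_pos h]
      simp only [check_eq_ok nums ((lo + hi) / 2) (by omega) (nums.length + 2) chg 0]
      split_ifs with hc
      · exact ih _ _ hlo
      · exact ih _ _ (by omega)
    · rw [if_neg h, if_neg h]

theorem minStable_eq_alt (nums : List Int) (chg : Int) : minStable nums chg = minStable_alt nums chg := by
  rw [minStable, minStable_alt, bs_eq_search nums chg (nums.length + 2) 1 (nums.length + 1) (by omega)]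

-- ===== VERDICT (by name: the statement is the Claim_ definition above) =====
theorem minStable_spec : Claim_equal_minStable := by
  intro nums chg _
  unfold Spec_minStable
  exact minStable_eq_alt nums chg
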